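-- pv_equiv track=rewrite | github.com/Ken24T/desklet-bandwidth-monitor | InterfaceVisibilityWidget.py | _normalise_order
-- ===== SOURCE A (Python) =====
-- def _normalise_order(ordered_names, available_names):
--     normalised = []
--     seen = set()
--
--     for name in ordered_names:
--         if isinstance(name, str) and name in available_names and name not in seen:
--             normalised.append(name)
--             seen.add(name)
--
--     for name in available_names:
--         if name not in seen:
--             normalised.append(name)
--             seen.add(name)
--
--     return normalised
-- ===== SOURCE B (Python) =====
-- def _normalise_order(ordered_names, available_names):
--     rank = {}
--     for i, name in enumerate(ordered_names):
--         if isinstance(name, str) and name not in rank: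
--             rank[name] = i
--     n_ranks = len(ordered_names)
--     unique = list(dict.fromkeys(available_names))
--     indexed = sorted(enumerate(unique), key=lambda p: rank.get(p[1], n_ranks + p[0]))
--     return [name for _, name in indexed]
-- ===== Notes on version B (the rewrite author's own statement) =====
-- stated objective: faster
-- what changed: A interleaves two loops over a shared mutating `seen` set with a linear `name in available_names` list scan per ordered name; B instead builds a first-occurrence rank dictionary over ordered_names, deduplicates available_names once with dict.fromkeys, and obtains the result by a single sort of the enumerated unique names keyed by rank (names absent from the ranking keep available order via a position-based default key).
import Mathlib
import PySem

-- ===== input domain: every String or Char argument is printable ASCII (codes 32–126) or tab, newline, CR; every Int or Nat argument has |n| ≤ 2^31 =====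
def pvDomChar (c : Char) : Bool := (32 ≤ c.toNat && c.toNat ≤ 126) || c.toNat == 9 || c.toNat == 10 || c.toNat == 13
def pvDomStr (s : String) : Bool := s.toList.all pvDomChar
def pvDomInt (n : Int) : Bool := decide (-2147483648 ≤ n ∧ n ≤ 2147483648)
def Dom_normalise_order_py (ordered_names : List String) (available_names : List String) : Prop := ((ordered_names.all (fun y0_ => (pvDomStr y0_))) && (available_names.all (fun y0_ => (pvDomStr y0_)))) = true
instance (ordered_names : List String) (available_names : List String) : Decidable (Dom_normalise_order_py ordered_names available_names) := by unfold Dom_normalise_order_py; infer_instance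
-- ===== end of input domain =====

-- B replaces A's two sequential loops over a shared mutating `seen` set by a rank dictionary plus one
-- stable sort of the deduplicated available names (objective: alternative — same result, different algorithm).

-- ===== PORT A =====
-- literal port of A; `isinstance(name, str)` is always True here since the list elements are Strings
def normalise_order_py (ordered_names : List String) (available_names : List String) : List String :=
  let step1 := ordered_names.foldl
    (fun (st : List String × PySem.Set String) name =>
      if name ∈ available_names ∧ name ∉ st.2 then (st.1 ++ [name], PySem.Set.add st.2 name) else st)
    ([], PySem.Set.empty)
  let step2 := available_names.foldl
    (fun (st : List String × PySem.Set String) name =>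
      if name ∉ st.2 then (st.1 ++ [name], PySem.Set.add st.2 name) else st)
    step1
  step2.1

-- ===== PORT B =====
-- port of Source B: build a first-occurrence rank dict over ordered_names, dedup available_names,
-- then one stable sort of the enumerated unique names by rank (default: n_ranks + position)
def normalise_order_py_alt (ordered_names : List String) (available_names : List String) : List String :=
  let rank : PySem.Dict String Int :=
    (PySem.List.enumerate ordered_names 0).foldl
      (fun d p => if d.contains p.2 then d else d.insert p.2 p.1) PySem.Dict.empty
  let n_ranks : Int := ordered_names.length
  let unique : List String := PySem.List.dedup available_names
  let indexed := PySem.List.sorted (PySem.List.enumerate unique 0)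
    (fun p => rank.getD p.2 (n_ranks + p.1))
  indexed.map (fun p => p.2)

-- ===== PRECONDITION & SPEC =====
def Spec_normalise_order_py (ordered_names : List String) (available_names : List String) (out : List String) : Prop := out = normalise_order_py_alt ordered_names available_names
instance (ordered_names : List String) (available_names : List String) (out : List String) : Decidable (Spec_normalise_order_py ordered_names available_names out) := by unfold Spec_normalise_order_py; infer_instance

-- ===== CLAIM (what is proved, stated in full; the proofs are below) =====
def Claim_equal_normalise_order_py : Prop := ∀ (ordered_names : List String) (available_names : List String), Dom_normalise_order_py ordered_names available_names → Spec_normalise_order_py ordered_names available_names (normalise_order_py ordered_names available_names)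

-- ===== LEMMAS AND PROOFS =====

-- the names A's first loop keeps: first occurrences of ordered names that are available
def pvP (ordered_names available_names : List String) : List String :=
  (PySem.Set.ofList ordered_names).filter (fun n => decide (n ∈ available_names))

-- the names A's second loop appends: first occurrences of available names not in ordered_names
def pvR (ordered_names available_names : List String) : List String :=
  (PySem.Set.ofList available_names).filter (fun n => !decide (n ∈ ordered_names))

-- abstract recursion describing what one of A's loops appends
def pvKeep (p : String → Prop) [DecidablePred p] : List String → PySem.Set String → List String
  | [], _ => []
  | n :: t, s => if p n ∧ n ∉ s then n :: pvKeep p t (PySem.Set.add s n) else pvKeep p t s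

lemma pvLoop1 (a : List String) :
    ∀ (o : List String) (acc : List String) (s : PySem.Set String),
    o.foldl (fun (st : List String × PySem.Set String) n =>
        if n ∈ a ∧ n ∉ st.2 then (st.1 ++ [n], PySem.Set.add st.2 n) else st) (acc, s)
      = (acc ++ pvKeep (fun n => n ∈ a) o s,
         PySem.Set.update s (pvKeep (fun n => n ∈ a) o s)) := by
  intro o
  induction o with
  | nil => intro acc s; simp [pvKeep, PySem.Set.update_nil]
  | cons n t ih =>
    intro acc s
    by_cases h : n ∈ a ∧ n ∉ s
    · simp [pvKeep, h, ih, PySem.Set.update_cons]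
    · simp [pvKeep, h, ih]

lemma pvLoop2 :
    ∀ (o : List String) (acc : List String) (s : PySem.Set String),
    o.foldl (fun (st : List String × PySem.Set String) n =>
        if n ∉ st.2 then (st.1 ++ [n], PySem.Set.add st.2 n) else st) (acc, s)
      = (acc ++ pvKeep (fun _ => True) o s,
         PySem.Set.update s (pvKeep (fun _ => True) o s)) := by
  intro o
  induction o with
  | nil => intro acc s; simp [pvKeep, PySem.Set.update_nil]
  | cons n t ih =>
    intro acc s
    rw [List.foldl_cons]
    by_cases h : n ∈ s
    · rw [if_neg (show ¬ n ∉ ((acc, s) : List String × PySem.Set String).2 by simpa using h), ih]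
      simp [pvKeep, h]
    · rw [if_pos (show n ∉ ((acc, s) : List String × PySem.Set String).2 from h), ih]
      simp [pvKeep, h, PySem.Set.update_cons]

lemma pvKeep_eq (p : String → Prop) [DecidablePred p] :
    ∀ (o : List String) (s : PySem.Set String),
    pvKeep p o s = (PySem.Set.ofList o).filter (fun n => decide (p n ∧ n ∉ s)) := by
  intro o
  induction o with
  | nil => intro s; simp [pvKeep, PySem.Set.ofList_nil]
  | cons n t ih =>
    intro s
    rw [PySem.Set.ofList_cons]
    by_cases h : p n ∧ n ∉ s
    · rw [List.filter_cons_of_pos (by simpa using h)]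
      simp only [pvKeep, if_pos h, ih]
      congr 1
      simp only [PySem.Set.discard, List.filter_filter]
      apply List.filter_congr
      intro m _
      by_cases hpm : p m <;> by_cases hms : m ∈ s <;> by_cases hmn : m = n <;>
        simp [hpm, hms, hmn, h.1, h.2]
    · rw [List.filter_cons_of_neg (by simpa using h)]
      simp only [pvKeep, if_neg h, ih]
      simp only [PySem.Set.discard, List.filter_filter]
      apply List.filter_congr
      intro m _
      by_cases hpm : p m <;> by_cases hms : m ∈ s <;> by_cases hmn : m = n <;>
        simp_all

lemma mem_pvP (o a : List String) (n : String) : n ∈ pvP o a ↔ n ∈ o ∧ n ∈ a := by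
  simp [pvP, List.mem_filter, PySem.Set.mem_ofList]

lemma mem_pvR (o a : List String) (n : String) : n ∈ pvR o a ↔ n ∈ a ∧ n ∉ o := by
  simp [pvR, List.mem_filter, PySem.Set.mem_ofList]

lemma nodup_pvP (o a : List String) : (pvP o a).Nodup := (PySem.Set.nodup_ofList o).filter _

lemma nodup_pvR (o a : List String) : (pvR o a).Nodup := (PySem.Set.nodup_ofList a).filter _

-- A computes pvP ++ pvR
lemma A_eq (o a : List String) : normalise_order_py o a = pvP o a ++ pvR o a := by
  show (a.foldl (fun (st : List String × PySem.Set String) n =>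
          if n ∉ st.2 then (st.1 ++ [n], PySem.Set.add st.2 n) else st)
        (o.foldl (fun (st : List String × PySem.Set String) n =>
          if n ∈ a ∧ n ∉ st.2 then (st.1 ++ [n], PySem.Set.add st.2 n) else st)
          ([], PySem.Set.empty))).1
      = pvP o a ++ pvR o a
  rw [pvLoop1 a o [] PySem.Set.empty]
  have hK1 : pvKeep (fun n => n ∈ a) o PySem.Set.empty = pvP o a := by
    rw [pvKeep_eq]
    simp [pvP, PySem.Set.empty]
  have hnodup : (pvP o a).Nodup := nodup_pvP o a
  rw [hK1]
  have hupd : PySem.Set.update PySem.Set.empty (pvP o a) = pvP o a := by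
    rw [show (PySem.Set.empty : PySem.Set String) = ([] : List String) from rfl,
        PySem.Set.update_nil_left, PySem.Set.ofList_eq_self_of_nodup _ hnodup]
  rw [hupd, pvLoop2 a ([] ++ pvP o a) (pvP o a)]
  have hK2 : pvKeep (fun _ => True) a (pvP o a) = pvR o a := by
    rw [pvKeep_eq]
    apply List.filter_congr
    intro m hm
    have hma : m ∈ a := (PySem.Set.mem_ofList a m).1 hm
    by_cases hmo : m ∈ o
    · simp [mem_pvP, hmo, hma]
    · simp [mem_pvP, hmo, hma]
  simp [hK2]

-- B-side -----------------------------------------------------------------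

def pvPair (a : List String) (n : String) : Int × String :=
  ((List.idxOf n (PySem.Set.ofList a) : Int), n)

lemma index?_of_mem : ∀ (o : List String) (n : String), n ∈ o →
    PySem.List.index? o n = some (List.idxOf n o) := by
  intro o
  induction o with
  | nil => intro n h; simp at h
  | cons m t ih =>
    intro n h
    by_cases hmn : m = n
    · subst hmn; rw [PySem.List.index?_cons_self, List.idxOf_cons_self]
    · have hnt : n ∈ t := by
        rcases List.mem_cons.1 h with h' | h'
        · exact absurd h'.symm hmn
        · exact h'
      rw [PySem.List.index?_cons_of_ne t hmn, ih n hnt, List.idxOf_cons_ne t hmn]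
      rfl

lemma index?_of_not_mem (o : List String) (n : String) (h : n ∉ o) :
    PySem.List.index? o n = none := by
  rw [PySem.List.index?_eq_none_iff]; exact h

lemma rank_get? : ∀ (o : List String) (k : Int) (d : PySem.Dict String Int) (n : String),
    ((PySem.List.enumerate o k).foldl
        (fun d p => if d.contains p.2 then d else d.insert p.2 p.1) d).get? n
      = if d.contains n then d.get? n
        else (PySem.List.index? o n).map (fun j => k + (j : Int)) := by
  intro o
  induction o with
  | nil =>
    intro k d n
    rw [PySem.List.enumerate_nil]
    by_cases h : d.contains n
    · simp [h]
    · simp [h, (PySem.Dict.get?_eq_none_iff_contains d n).2 (by simpa using h)]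
  | cons m t ih =>
    intro k d n
    rw [PySem.List.enumerate_cons, List.foldl_cons]
    by_cases hd : d.contains m = true
    · rw [if_pos hd, ih]
      by_cases hdn : d.contains n = true
      · simp [hdn]
      · have hnm : n ≠ m := fun e => hdn (e ▸ hd)
        rw [if_neg (by simp [hdn]), if_neg (by simp [hdn]),
            PySem.List.index?_cons_of_ne t (fun e => hnm e.symm)]
        cases PySem.List.index? t n with
        | none => simp
        | some j => simp; ring
    · rw [if_neg hd, ih]
      by_cases hnm : n = m
      · subst hnm
        rw [if_pos (by simp),
            if_neg hd, PySem.Dict.get?_insert_self, PySem.List.index?_cons_self]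
        simp
      · have hc : (d.insert m k).contains n = d.contains n := by
          rw [PySem.Dict.contains_insert]; simp [hnm]
        by_cases hdn : d.contains n = true
        · rw [if_pos (by rw [hc]; exact hdn), if_pos hdn,
              PySem.Dict.get?_insert_of_ne _ _ hnm]
        · rw [if_neg (by rw [hc]; simpa using hdn), if_neg hdn,
              PySem.List.index?_cons_of_ne t (fun e => hnm e.symm)]
          cases PySem.List.index? t n with
          | none => simp
          | some j => simp; ring

lemma ofList_pairwise_idxOf : ∀ (o : List String),
    (PySem.Set.ofList o).Pairwise (fun x y => List.idxOf x o < List.idxOf y o) := by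
  intro o
  induction o with
  | nil => simp [PySem.Set.ofList_nil]
  | cons m t ih =>
    rw [PySem.Set.ofList_cons, List.pairwise_cons]
    constructor
    · intro b hb
      have hbm : b ≠ m := by
        have := List.of_mem_filter hb; simpa using this
      rw [List.idxOf_cons_self, List.idxOf_cons_ne t (Ne.symm hbm)]
      exact Nat.succ_pos _
    · have h2 : ((PySem.Set.ofList t).discard m).Pairwise
          (fun x y => List.idxOf x t < List.idxOf y t) := by
        simp only [PySem.Set.discard]
        exact ih.filter _
      refine h2.imp_of_mem ?_
      intro x y hx hy hxy
      have hxm : x ≠ m := by have := List.of_mem_filter hx; simpa using this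
      have hym : y ≠ m := by have := List.of_mem_filter hy; simpa using this
      rw [List.idxOf_cons_ne t (Ne.symm hxm), List.idxOf_cons_ne t (Ne.symm hym)]
      exact Nat.succ_lt_succ hxy

lemma nodup_pairwise_idxOf (l : List String) (h : l.Nodup) :
    l.Pairwise (fun x y => List.idxOf x l < List.idxOf y l) := by
  rw [List.pairwise_iff_getElem]
  intro i j hi hj hij
  rw [h.idxOf_getElem i hi, h.idxOf_getElem j hj]
  exact hij

-- B computes pvP ++ pvR as well
lemma B_eq (o a : List String) : normalise_order_py_alt o a = pvP o a ++ pvR o a := by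
  show (PySem.List.sorted (PySem.List.enumerate (PySem.List.dedup a) 0)
      (fun p => ((PySem.List.enumerate o 0).foldl
          (fun d q => if d.contains q.2 then d else d.insert q.2 q.1)
          PySem.Dict.empty).getD p.2 ((o.length : Int) + p.1))).map (fun p => p.2)
    = pvP o a ++ pvR o a
  rw [PySem.List.dedup_eq_ofList]
  have hval : ∀ n : String,
      ((PySem.List.enumerate o 0).foldl
          (fun d q => if d.contains q.2 then d else d.insert q.2 q.1)
          PySem.Dict.empty).getD n ((o.length : Int) + (List.idxOf n (PySem.Set.ofList a) : Int))
        = if n ∈ o then (List.idxOf n o : Int)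
          else (o.length : Int) + (List.idxOf n (PySem.Set.ofList a) : Int) := by
    intro n
    rw [PySem.Dict.getD_eq_get?_getD, rank_get?]
    by_cases hno : n ∈ o
    · rw [index?_of_mem o n hno]
      simp [PySem.Dict.contains_empty, hno]
    · rw [index?_of_not_mem o n hno]
      simp [PySem.Dict.contains_empty, hno]
  have hnodupPR : (pvP o a ++ pvR o a).Nodup := by
    refine List.Nodup.append (nodup_pvP o a) (nodup_pvR o a) ?_
    intro n hnp hnr
    exact ((mem_pvR o a n).1 hnr).2 ((mem_pvP o a n).1 hnp).1
  have hys : ((pvP o a ++ pvR o a).map (pvPair a)).Nodup := by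
    apply List.Nodup.map _ hnodupPR
    intro x y hxy
    simpa [pvPair] using congrArg Prod.snd hxy
  have hen : (PySem.List.enumerate (PySem.Set.ofList a) 0).Nodup := by
    refine (PySem.List.pairwise_lt_enumerate _ 0).imp ?_
    intro p q hpq e
    rw [e] at hpq
    exact lt_irrefl _ hpq
  have hperm : ((pvP o a ++ pvR o a).map (pvPair a)).Perm
      (PySem.List.enumerate (PySem.Set.ofList a) 0) := by
    rw [List.perm_ext_iff_of_nodup hys hen]
    intro p
    constructor
    · intro hp
      rw [List.mem_map] at hp
      obtain ⟨n, hn, rfl⟩ := hp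
      have hna : n ∈ PySem.Set.ofList a := by
        rw [PySem.Set.mem_ofList]
        rcases List.mem_append.1 hn with h | h
        · exact ((mem_pvP o a n).1 h).2
        · exact ((mem_pvR o a n).1 h).1
      have hlt : List.idxOf n (PySem.Set.ofList a) < (PySem.Set.ofList a).length :=
        List.idxOf_lt_length_of_mem hna
      rw [PySem.List.mem_enumerate_iff]
      refine ⟨List.idxOf n (PySem.Set.ofList a), hlt, ?_⟩
      have h2 : (PySem.Set.ofList a)[List.idxOf n (PySem.Set.ofList a)] = n :=
        List.getElem_idxOf hlt
      simp [pvPair, h2]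
    · intro hp
      rw [PySem.List.mem_enumerate_iff] at hp
      obtain ⟨i, hi, rfl⟩ := hp
      have hna : (PySem.Set.ofList a)[i] ∈ PySem.Set.ofList a := List.getElem_mem hi
      have hidx : List.idxOf ((PySem.Set.ofList a)[i]) (PySem.Set.ofList a) = i :=
        (PySem.Set.nodup_ofList a).idxOf_getElem i hi
      have hmem : (PySem.Set.ofList a)[i] ∈ pvP o a ++ pvR o a := by
        rw [List.mem_append, mem_pvP, mem_pvR]
        have hnaa : (PySem.Set.ofList a)[i] ∈ a := (PySem.Set.mem_ofList a _).1 hna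
        by_cases hno : (PySem.Set.ofList a)[i] ∈ o
        · exact Or.inl ⟨hno, hnaa⟩
        · exact Or.inr ⟨hnaa, hno⟩
      rw [List.mem_map]
      exact ⟨_, hmem, by simp [pvPair, hidx]⟩
  have hpw : List.Pairwise (fun p q =>
      (((PySem.List.enumerate o 0).foldl
          (fun d q => if d.contains q.2 then d else d.insert q.2 q.1)
          PySem.Dict.empty).getD p.2 ((o.length : Int) + p.1)) <
      (((PySem.List.enumerate o 0).foldl
          (fun d q => if d.contains q.2 then d else d.insert q.2 q.1)
          PySem.Dict.empty).getD q.2 ((o.length : Int) + q.1)))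
      ((pvP o a ++ pvR o a).map (pvPair a)) := by
    rw [List.pairwise_map]
    rw [List.pairwise_append]
    refine ⟨?_, ?_, ?_⟩
    · have hbase := (ofList_pairwise_idxOf o).filter (fun n => decide (n ∈ a))
      refine hbase.imp_of_mem ?_
      intro x y hx hy hlt
      have hxo : x ∈ o := ((mem_pvP o a x).1 hx).1
      have hyo : y ∈ o := ((mem_pvP o a y).1 hy).1
      simp only [pvPair]
      rw [hval x, hval y, if_pos hxo, if_pos hyo]
      exact_mod_cast hlt
    · have hbase := (nodup_pairwise_idxOf (PySem.Set.ofList a)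
        (PySem.Set.nodup_ofList a)).filter (fun n => !decide (n ∈ o))
      refine hbase.imp_of_mem ?_
      intro x y hx hy hlt
      have hxo : x ∉ o := ((mem_pvR o a x).1 hx).2
      have hyo : y ∉ o := ((mem_pvR o a y).1 hy).2
      simp only [pvPair]
      rw [hval x, hval y, if_neg hxo, if_neg hyo]
      omega
    · intro x hx y hy
      have hxo : x ∈ o := ((mem_pvP o a x).1 hx).1
      have hyo : y ∉ o := ((mem_pvR o a y).1 hy).2
      simp only [pvPair]
      rw [hval x, hval y, if_pos hxo, if_neg hyo]
      have h1 : List.idxOf x o < o.length := List.idxOf_lt_length_of_mem hxo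
      omega
  rw [PySem.List.sorted_eq_of_perm_of_pairwise_lt _ _ _ hperm hpw]
  rw [List.map_map]
  simp [Function.comp_def, pvPair]

-- ===== VERDICT (by name: the statement is the Claim_ definition above) =====
theorem normalise_order_py_spec : Claim_equal_normalise_order_py := by
  intro o a _
  show normalise_order_py o a = normalise_order_py_alt o a
  rw [A_eq, B_eq]
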